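-- pv_equiv track=rewrite | github.com/peaclab/praxi | fall2019/basic_rule_class.py | transform_tagsets
-- ===== SOURCE A (Python) =====
-- from collections import OrderedDict
--
-- def transform_tagsets(tagsets, labels, take_max=False):  # Changesets as dictionaries
--     res = OrderedDict()
--     for data, label in zip(tagsets, labels):
--         for token in data:
--             if label not in res:
--                 res[label] = OrderedDict()
--             if token not in res[label]:
--                 res[label][token] = 1
--             else:
--                 res[label][token] += 1
--     newres = dict()
--     for label in res:
--         newres[label] = set()
--         maxval = max(res[label].values())
--         for token in sorted(res[label], key=res[label].get, reverse=True):
--             if res[label][token] < (maxval):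
--                 break
--             newres[label].add(token)
--     return newres
-- ===== SOURCE B (Python) =====
-- from collections import Counter
--
--
-- def transform_tagsets(tagsets, labels, take_max=False):
--     # One flat Counter keyed by (label, token) occurrence pairs, then a single
--     # streaming pass over its items that maintains, per label, the running
--     # maximum count and the set of tokens currently achieving it -- no nested
--     # per-label dicts, no max() scan, no sort.
--     pair_counts = Counter((label, token)
--                           for data, label in zip(tagsets, labels)
--                           for token in data)
--     best = {}  # label -> (current max count, set of argmax tokens)
--     for (label, token), c in pair_counts.items():
--         cur = best.get(label)
--         if cur is None or c > cur[0]: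
--             best[label] = (c, {token})
--         elif c == cur[0]:
--             cur[1].add(token)
--     return {label: winners for label, (_, winners) in best.items()}
-- ===== Notes on version B (the rewrite author's own statement) =====
-- stated objective: alternative
-- what changed: B builds one flat Counter keyed by (label, token) pairs and then makes a single streaming pass over its items, maintaining per label the running maximum count and the set of tokens achieving it, instead of A's nested per-label count dicts followed by a per-label sort of tokens by count with an early break.
import Mathlib
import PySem

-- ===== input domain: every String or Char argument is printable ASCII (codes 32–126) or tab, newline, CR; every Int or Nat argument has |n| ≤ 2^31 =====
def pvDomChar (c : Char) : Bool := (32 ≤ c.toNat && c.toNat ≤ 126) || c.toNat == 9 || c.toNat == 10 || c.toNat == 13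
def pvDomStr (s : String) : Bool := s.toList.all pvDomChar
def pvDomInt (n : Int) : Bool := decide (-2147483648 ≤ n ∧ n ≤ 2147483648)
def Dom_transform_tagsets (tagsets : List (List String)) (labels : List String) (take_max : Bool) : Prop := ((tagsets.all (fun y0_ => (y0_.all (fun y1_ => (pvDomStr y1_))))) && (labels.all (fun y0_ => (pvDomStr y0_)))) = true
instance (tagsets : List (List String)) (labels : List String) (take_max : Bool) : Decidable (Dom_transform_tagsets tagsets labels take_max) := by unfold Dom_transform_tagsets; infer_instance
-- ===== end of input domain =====

-- ===== PORT A =====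
-- B replaces A's nested per-label count dicts + per-label sort-and-break selection by ONE flat
-- Counter over (label, token) pairs and a single streaming pass that maintains each label's
-- running maximum count and its argmax token set (objective: alternative algorithm; no sort).
-- helper for A's inner 'for token in sorted(...): if ... < maxval: break; add' loop (the break becomes recursion that stops)
def pickLoop (d : PySem.Dict String Int) (maxval : Int) : List String → PySem.Set String → PySem.Set String
  | [], s => s
  | t :: ts, s => if d.getD t 0 < maxval then s else pickLoop d maxval ts (PySem.Set.add s t)

def transform_tagsets (tagsets : List (List String)) (labels : List String) (take_max : Bool) : List (String × List String) :=
  let res : PySem.Dict String (PySem.Dict String Int) :=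
    (tagsets.zip labels).foldl (fun res dl =>
      dl.1.foldl (fun res token =>
        let res := if res.contains dl.2 = false then res.insert dl.2 PySem.Dict.empty else res
        let inner := res.getD dl.2 PySem.Dict.empty
        if inner.contains token = false then res.insert dl.2 (inner.insert token 1)
        else res.insert dl.2 (inner.insert token (inner.getD token 0 + 1))) res) PySem.Dict.empty
  let newres : PySem.Dict String (PySem.Set String) :=
    res.items.foldl (fun newres kv =>
      let newres := newres.insert kv.1 PySem.Set.empty
      -- max(values): the inner dict is nonempty here (a label is only created together with a token), so Python's max does not raise; max? = some
      let maxval := (PySem.List.max? kv.2.values (fun v => v)).getD 0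
      -- key=res[label].get: every iterated token is a key of the dict, so .get returns its count
      let picked := pickLoop kv.2 maxval (PySem.List.sorted kv.2.keys (fun t => kv.2.getD t 0) true) (newres.getD kv.1 PySem.Set.empty)
      newres.insert kv.1 picked) PySem.Dict.empty
  newres.items

-- ===== PORT B =====
def transform_tagsets_alt (tagsets : List (List String)) (labels : List String) (take_max : Bool) : List (String × List String) :=
  -- Counter over the generator of (label, token) occurrence pairs
  let pair_counts : PySem.Dict (String × String) Int :=
    PySem.Dict.counter ((tagsets.zip labels).foldl (fun acc dl => acc ++ dl.1.map (fun t => (dl.2, t))) [])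
  -- one streaming pass: best[label] = (current max count, set of argmax tokens)
  let best : PySem.Dict String (Int × PySem.Set String) :=
    pair_counts.items.foldl (fun best kv =>
      match best.get? kv.1.1 with
      | none => best.insert kv.1.1 (kv.2, PySem.Set.add PySem.Set.empty kv.1.2)
      | some cur =>
        if cur.1 < kv.2 then best.insert kv.1.1 (kv.2, PySem.Set.add PySem.Set.empty kv.1.2)
        else if kv.2 == cur.1 then best.insert kv.1.1 (cur.1, PySem.Set.add cur.2 kv.1.2)
        else best) PySem.Dict.empty
  best.items.map (fun p => (p.1, p.2.2))

-- ===== PRECONDITION & SPEC =====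
def Spec_transform_tagsets (tagsets : List (List String)) (labels : List String) (take_max : Bool) (out : List (String × List String)) : Prop := out = transform_tagsets_alt tagsets labels take_max
instance (tagsets : List (List String)) (labels : List String) (take_max : Bool) (out : List (String × List String)) : Decidable (Spec_transform_tagsets tagsets labels take_max out) := by unfold Spec_transform_tagsets; infer_instance

-- ===== CLAIM (what is proved, stated in full; the proofs are below) =====
def Claim_equal_transform_tagsets : Prop := ∀ (tagsets : List (List String)) (labels : List String) (take_max : Bool), Dom_transform_tagsets tagsets labels take_max → Spec_transform_tagsets tagsets labels take_max (transform_tagsets tagsets labels take_max)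

-- ===== LEMMAS AND PROOFS =====

-- ---- shared abbreviations used only by the proofs ----
-- A's per-label winners: tokens of `toks` whose count equals the maximal count
def maxvOf (toks : List String) : Int := (PySem.List.max? (PySem.Dict.counter toks).values (fun v => v)).getD 0
def winA (toks : List String) : PySem.Set String :=
  PySem.Set.ofList (((PySem.Dict.counter toks).items.filter (fun p => p.2 == maxvOf toks)).map (·.1))

-- ---- A-side: value-map view of a dict (same keys/order, transformed values) ----
def mapVal (f : List String → PySem.Dict String Int) (g : PySem.Dict String (List String)) : PySem.Dict String (PySem.Dict String Int) :=
  PySem.Dict.mk (g.items.map (fun p => (p.1, f p.2)))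

lemma get?_mapVal (f : List String → PySem.Dict String Int) (g : PySem.Dict String (List String)) (k : String) :
    (mapVal f g).get? k = (g.get? k).map f := by
  simp [mapVal, PySem.Dict.get?, List.find?_map, Option.map_map, Function.comp_def]

lemma contains_mapVal (f : List String → PySem.Dict String Int) (g : PySem.Dict String (List String)) (k : String) :
    (mapVal f g).contains k = g.contains k := by
  simp [mapVal, PySem.Dict.contains, List.any_map, Function.comp_def]

lemma insert_mapVal (f : List String → PySem.Dict String Int) (g : PySem.Dict String (List String)) (k : String) (v : List String) :
    mapVal f (g.insert k v) = (mapVal f g).insert k (f v) := by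
  unfold PySem.Dict.insert
  rw [contains_mapVal]
  by_cases hc : g.contains k = true
  · simp only [hc, if_pos]
    simp only [mapVal, List.map_map]
    congr 1
    apply List.map_congr_left
    intro p _
    by_cases h : p.1 = k <;> simp [h]
  · simp only [hc]
    simp [mapVal]

lemma get?_isSome_of_contains (g : PySem.Dict String (List String)) (k : String)
    (h : g.contains k = true) : ∃ v, g.get? k = some v := by
  simp only [PySem.Dict.contains, List.any_eq_true] at h
  obtain ⟨p, hp, hk⟩ := h
  have h2 : (List.find? (fun p : String × List String => p.1 == k) g.items).isSome :=
    List.find?_isSome.mpr ⟨p, hp, hk⟩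
  simp only [PySem.Dict.get?]
  obtain ⟨q, hq⟩ := Option.isSome_iff_exists.mp h2
  exact ⟨q.2, by rw [hq]; rfl⟩

lemma branch_unif (res : PySem.Dict String (PySem.Dict String Int)) (label : String)
    (inner : PySem.Dict String Int) (token : String) :
    (if inner.contains token = false then res.insert label (inner.insert token 1)
     else res.insert label (inner.insert token (inner.getD token 0 + 1)))
      = res.insert label (inner.insert token (inner.getD token 0 + 1)) := by
  split
  · rw [PySem.Dict.getD_of_not_contains inner 0 (by simp_all)]; norm_num
  · rfl

lemma tok_step (g : PySem.Dict String (List String)) (label token : String) :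
    (let res := if (mapVal PySem.Dict.counter g).contains label = false
                then (mapVal PySem.Dict.counter g).insert label PySem.Dict.empty
                else mapVal PySem.Dict.counter g
     let inner := res.getD label PySem.Dict.empty
     if inner.contains token = false then res.insert label (inner.insert token 1)
     else res.insert label (inner.insert token (inner.getD token 0 + 1)))
      = mapVal PySem.Dict.counter (g.insert label (g.getD label [] ++ [token])) := by
  by_cases hc : g.contains label = true
  · obtain ⟨toks, htoks⟩ := get?_isSome_of_contains g label hc
    have hgd : g.getD label [] = toks := by simp [PySem.Dict.getD, htoks]
    have hinner : (mapVal PySem.Dict.counter g).getD label PySem.Dict.empty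
        = PySem.Dict.counter toks := by
      simp [PySem.Dict.getD, get?_mapVal, htoks]
    simp only [contains_mapVal, hc, Bool.true_eq_false, if_false]
    rw [hinner, branch_unif, hgd, insert_mapVal]
    congr 1
    rw [PySem.Dict.counter_append_singleton]
    rfl
  · have hc' : g.contains label = false := by simpa using hc
    have hgd : g.getD label [] = [] := PySem.Dict.getD_of_not_contains g [] hc'
    have hinner : ((mapVal PySem.Dict.counter g).insert label PySem.Dict.empty).getD label PySem.Dict.empty
        = PySem.Dict.counter [] := by
      simp [PySem.Dict.getD, PySem.Dict.get?_insert_self]; rfl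
    simp only [contains_mapVal, hc', if_true, hgd, List.nil_append]
    rw [hinner, branch_unif]
    have hres : (mapVal PySem.Dict.counter g).insert label PySem.Dict.empty
        = mapVal PySem.Dict.counter (g.insert label []) := (insert_mapVal _ g label []).symm
    have hCtok : PySem.Dict.counter [token]
        = (PySem.Dict.counter []).insert token ((PySem.Dict.counter []).getD token 0 + 1) := by
      rw [show ([token] : List String) = [] ++ [token] from rfl, PySem.Dict.counter_append_singleton]
      rfl
    rw [hres, ← hCtok, ← insert_mapVal, PySem.Dict.insert_insert_self]

lemma tok_fold (data : List String) : ∀ (g : PySem.Dict String (List String)) (label : String),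
    data.foldl (fun res token =>
      let res := if res.contains label = false then res.insert label PySem.Dict.empty else res
      let inner := res.getD label PySem.Dict.empty
      if inner.contains token = false then res.insert label (inner.insert token 1)
      else res.insert label (inner.insert token (inner.getD token 0 + 1))) (mapVal PySem.Dict.counter g)
      = mapVal PySem.Dict.counter (data.foldl (fun h t => h.insert label (h.getD label [] ++ [t])) g) := by
  induction data with
  | nil => intro g label; rfl
  | cons t ts ih =>
    intro g label
    simp only [List.foldl_cons]
    rw [tok_step g label t]
    exact ih _ label

lemma fold_insert_append : ∀ (data : List String) (g : PySem.Dict String (List String)) (label : String), data ≠ [] →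
    data.foldl (fun h t => h.insert label (h.getD label [] ++ [t])) g = g.insert label (g.getD label [] ++ data) := by
  intro data
  induction data with
  | nil => intro g label h; exact absurd rfl h
  | cons t ts ih =>
    intro g label _
    rcases ts with _ | ⟨u, us⟩
    · rfl
    · rw [List.foldl_cons, ih _ label (by simp)]
      rw [show (g.insert label (g.getD label [] ++ [t])).getD label []
            = g.getD label [] ++ [t] by rw [PySem.Dict.getD_insert]; simp]
      rw [PySem.Dict.insert_insert_self]
      simp

lemma zip_fold (pairs : List (List String × String)) : ∀ (g : PySem.Dict String (List String)),
    pairs.foldl (fun res dl =>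
      dl.1.foldl (fun res token =>
        let res := if res.contains dl.2 = false then res.insert dl.2 PySem.Dict.empty else res
        let inner := res.getD dl.2 PySem.Dict.empty
        if inner.contains token = false then res.insert dl.2 (inner.insert token 1)
        else res.insert dl.2 (inner.insert token (inner.getD token 0 + 1))) res) (mapVal PySem.Dict.counter g)
      = mapVal PySem.Dict.counter (pairs.foldl (fun g dl =>
          if dl.1.isEmpty = false then g.modify dl.2 [] (· ++ dl.1) else g) g) := by
  induction pairs with
  | nil => intro g; rfl
  | cons dl ps ih =>
    intro g
    simp only [List.foldl_cons]
    rw [show (dl.1.foldl (fun res token =>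
        let res := if res.contains dl.2 = false then res.insert dl.2 PySem.Dict.empty else res
        let inner := res.getD dl.2 PySem.Dict.empty
        if inner.contains token = false then res.insert dl.2 (inner.insert token 1)
        else res.insert dl.2 (inner.insert token (inner.getD token 0 + 1))) (mapVal PySem.Dict.counter g))
      = mapVal PySem.Dict.counter (if dl.1.isEmpty = false then g.modify dl.2 [] (· ++ dl.1) else g) from ?_]
    · exact ih _
    · rcases hdata : dl.1 with _ | ⟨t, ts⟩
      · simp
      · rw [tok_fold (t :: ts) g dl.2,
            fold_insert_append (t :: ts) g dl.2 (by simp)]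
        simp [PySem.Dict.modify]

-- ---- A-side selection phase ----
lemma pairwise_insertBy (f : String → Int) (x : String) (acc : List String)
    (h : acc.Pairwise (fun a b => f b ≤ f a)) :
    (PySem.List.insertBy (fun a b => decide (f b < f a)) x acc).Pairwise (fun a b => f b ≤ f a) := by
  induction acc with
  | nil => simp [PySem.List.insertBy]
  | cons y ys ih =>
    rw [List.pairwise_cons] at h
    rw [PySem.List.insertBy]
    split
    · rename_i hlt
      simp only [decide_eq_true_eq] at hlt
      refine List.Pairwise.cons ?_ (List.Pairwise.cons h.1 h.2)
      intro z hz
      rcases hz with _ | hz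
      · exact le_of_lt hlt
      · exact le_trans (h.1 z (by assumption)) (le_of_lt hlt)
    · rename_i hge
      simp only [decide_eq_true_eq, not_lt] at hge
      refine List.Pairwise.cons ?_ (ih h.2)
      intro z hz
      rw [PySem.List.mem_insertBy] at hz
      rcases hz with rfl | hz
      · exact hge
      · exact h.1 z hz

lemma filter_insertBy (f : String → Int) (m : Int) (x : String) (acc : List String)
    (hp : acc.Pairwise (fun a b => f b ≤ f a)) (hb : ∀ y ∈ acc, f y ≤ m) (_hx : f x ≤ m) :
    (PySem.List.insertBy (fun a b => decide (f b < f a)) x acc).filter (fun t => f t == m)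
      = acc.filter (fun t => f t == m) ++ if f x = m then [x] else [] := by
  induction acc with
  | nil => simp [PySem.List.insertBy]; split <;> simp_all
  | cons y ys ih =>
    rw [List.pairwise_cons] at hp
    rw [PySem.List.insertBy]
    split
    · rename_i hlt
      simp only [decide_eq_true_eq] at hlt
      by_cases hxm : f x = m
      · have hynil : (f y == m) = false := by simp; omega
        have hnil : List.filter (fun t => f t == m) ys = [] := by
          apply List.filter_eq_nil_iff.mpr
          intro z hz
          have := hp.1 z hz
          simp
          omega
        simp [hxm, hynil, hnil]
      · have hxf : (f x == m) = false := by simp [hxm]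
        simp [List.filter_cons, hxf, hxm]
    · rename_i hge
      rw [List.filter_cons, List.filter_cons]
      rw [ih hp.2 (fun z hz => hb z (List.mem_cons_of_mem _ hz))]
      split <;> simp

lemma filter_foldl_insertBy (f : String → Int) (m : Int) (l : List String) :
    ∀ acc, acc.Pairwise (fun a b => f b ≤ f a) → (∀ y ∈ acc, f y ≤ m) → (∀ y ∈ l, f y ≤ m) →
    (l.foldl (fun acc x => PySem.List.insertBy (fun a b => decide (f b < f a)) x acc) acc).filter (fun t => f t == m)
      = acc.filter (fun t => f t == m) ++ l.filter (fun t => f t == m) := by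
  induction l with
  | nil => intro acc _ _ _; simp
  | cons x xs ih =>
    intro acc hp hb hl
    rw [List.foldl_cons]
    rw [ih _ (pairwise_insertBy f x acc hp)
          (fun z hz => by
            rw [PySem.List.mem_insertBy] at hz
            rcases hz with rfl | hz
            · exact hl z (List.mem_cons_self ..)
            · exact hb z hz)
          (fun z hz => hl z (List.mem_cons_of_mem _ hz))]
    rw [filter_insertBy f m x acc hp hb (hl x (List.mem_cons_self ..))]
    rw [List.filter_cons]
    split <;> simp_all

lemma sorted_filter_max (keys : List String) (f : String → Int) (m : Int)
    (hb : ∀ t ∈ keys, f t ≤ m) :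
    (PySem.List.sorted keys f true).filter (fun t => f t == m) = keys.filter (fun t => f t == m) := by
  rw [PySem.List.sorted_rev_eq_foldl_insertBy]
  simpa using filter_foldl_insertBy f m keys [] (by simp) (by simp) hb

lemma pickLoop_eq (d : PySem.Dict String Int) (m : Int) :
    ∀ (ys : List String) (s : PySem.Set String),
    ys.Pairwise (fun a b => d.getD b 0 ≤ d.getD a 0) → (∀ y ∈ ys, d.getD y 0 ≤ m) →
    pickLoop d m ys s = (ys.filter (fun t => d.getD t 0 == m)).foldl PySem.Set.add s := by
  intro ys
  induction ys with
  | nil => intro s _ _; rfl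
  | cons t ts ih =>
    intro s hp hb
    rw [List.pairwise_cons] at hp
    rw [pickLoop, List.filter_cons]
    by_cases hlt : d.getD t 0 < m
    · have hne : (d.getD t 0 == m) = false := by simp; omega
      rw [if_pos hlt, hne, if_neg (by simp)]
      have : ts.filter (fun t => d.getD t 0 == m) = [] := by
        apply List.filter_eq_nil_iff.mpr
        intro z hz
        have := hp.1 z hz
        simp; omega
      rw [this]
      rfl
    · have heq : d.getD t 0 = m := le_antisymm (hb t (List.mem_cons_self ..)) (by omega)
      rw [if_neg hlt, if_pos (by simp [heq]), List.foldl_cons]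
      exact ih (PySem.Set.add s t) hp.2 (fun z hz => hb z (List.mem_cons_of_mem _ hz))

lemma counter_bound (toks : List String) (t : String) (ht : t ∈ (PySem.Dict.counter toks).keys) :
    (PySem.Dict.counter toks).getD t 0 ≤ maxvOf toks := by
  rw [PySem.Dict.keys_counter] at ht
  rw [PySem.Dict.getD_counter, maxvOf]
  have hvals : (PySem.Dict.counter toks).values
      = (PySem.Set.ofList toks).map (fun k => (toks.count k : Int)) := by
    show (PySem.Dict.counter toks).items.map (·.2) = _
    rw [PySem.Dict.items_counter]
    simp [List.map_map, Function.comp_def]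
  have hv : ((toks.count t : Int)) ∈ (PySem.Dict.counter toks).values := by
    rw [hvals]; exact List.mem_map.mpr ⟨t, ht, rfl⟩
  cases hmax : PySem.List.max? (PySem.Dict.counter toks).values (fun v => v) with
  | none =>
    rw [PySem.List.max?_eq_none_iff] at hmax
    rw [hmax] at hv
    simp at hv
  | some mv => simpa using PySem.List.max?_isMax hmax _ hv

lemma sel_eq (toks : List String) :
    pickLoop (PySem.Dict.counter toks) (maxvOf toks)
        (PySem.List.sorted (PySem.Dict.counter toks).keys (fun t => (PySem.Dict.counter toks).getD t 0) true)
        PySem.Set.empty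
      = winA toks := by
  have hnd := PySem.Dict.nodup_keys_counter toks
  have hb : ∀ t ∈ (PySem.Dict.counter toks).keys,
      (PySem.Dict.counter toks).getD t 0 ≤ maxvOf toks :=
    fun t ht => counter_bound toks t ht
  rw [pickLoop_eq _ _ _ _ (PySem.List.sorted_pairwise_rev _ _)
        (fun y hy => hb y ((PySem.List.mem_sorted _ _ _ _).mp hy))]
  rw [sorted_filter_max _ _ _ hb]
  rw [winA, PySem.Dict.items_eq_map_keys _ hnd 0]
  rw [List.filter_map]
  rw [show ((fun p => p.2 == maxvOf toks) ∘
        (fun k => (k, (PySem.Dict.counter toks).getD k 0)))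
      = (fun t => (PySem.Dict.counter toks).getD t 0 == maxvOf toks) from rfl]
  rw [List.map_map]
  rw [show ((fun (p : String × Int) => p.1) ∘ (fun k => (k, (PySem.Dict.counter toks).getD k 0))) = id from rfl]
  rw [List.map_id]
  rfl

lemma out_fold (items : List (String × List String)) :
    ∀ (acc : PySem.Dict String (PySem.Set String)),
    (items.map (fun p => (p.1, PySem.Dict.counter p.2))).foldl (fun newres kv =>
        let newres := newres.insert kv.1 PySem.Set.empty
        let maxval := (PySem.List.max? kv.2.values (fun v => v)).getD 0
        let picked := pickLoop kv.2 maxval (PySem.List.sorted kv.2.keys (fun t => kv.2.getD t 0) true)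
            (newres.getD kv.1 PySem.Set.empty)
        newres.insert kv.1 picked) acc
      = items.foldl (fun newres lt => newres.insert lt.1 (winA lt.2)) acc := by
  induction items with
  | nil => intro acc; rfl
  | cons p ps ih =>
    intro acc
    simp only [List.map_cons, List.foldl_cons]
    rw [← ih]
    congr 1
    show ((acc.insert p.1 PySem.Set.empty).insert p.1 _) = _
    rw [PySem.Dict.insert_insert_self]
    congr 1
    rw [show (acc.insert p.1 PySem.Set.empty).getD p.1 PySem.Set.empty = PySem.Set.empty by
      rw [PySem.Dict.getD_insert]; simp]
    exact sel_eq p.2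

-- ---- B-side: normal form of the streaming step ----
def updB (cur : Option (Int × PySem.Set String)) (kv : (String × String) × Int) : Int × PySem.Set String :=
  match cur with
  | none => (kv.2, PySem.Set.add PySem.Set.empty kv.1.2)
  | some c => if c.1 < kv.2 then (kv.2, PySem.Set.add PySem.Set.empty kv.1.2)
              else if kv.2 == c.1 then (c.1, PySem.Set.add c.2 kv.1.2)
              else c

lemma insert_get?_self (d : PySem.Dict String (Int × PySem.Set String)) (k : String)
    (v : Int × PySem.Set String) (hnd : d.keys.Nodup) (h : d.get? k = some v) :
    d.insert k v = d := by
  apply PySem.Dict.ext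
  rw [PySem.Dict.items_insert_of_contains _ v (by rw [PySem.Dict.contains_eq_isSome_get?, h]; rfl)]
  conv_rhs => rw [← List.map_id d.items]
  apply List.map_congr_left
  intro p hp
  by_cases hk : (p.1 == k) = true
  · have hv : d.get? p.1 = some p.2 := PySem.Dict.get?_of_mem_items d hp hnd
    rw [eq_of_beq hk, h] at hv
    have : p = (k, v) := by
      obtain ⟨p1, p2⟩ := p
      simp only at hk
      simp [eq_of_beq hk, Option.some_inj.mp hv]
    simp [this]
  · simp [hk]

lemma stepB_eq (best : PySem.Dict String (Int × PySem.Set String)) (kv : (String × String) × Int)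
    (hnd : best.keys.Nodup) :
    (match best.get? kv.1.1 with
      | none => best.insert kv.1.1 (kv.2, PySem.Set.add PySem.Set.empty kv.1.2)
      | some cur =>
        if cur.1 < kv.2 then best.insert kv.1.1 (kv.2, PySem.Set.add PySem.Set.empty kv.1.2)
        else if kv.2 == cur.1 then best.insert kv.1.1 (cur.1, PySem.Set.add cur.2 kv.1.2)
        else best)
      = best.insert kv.1.1 (updB (best.get? kv.1.1) kv) := by
  cases h : best.get? kv.1.1 with
  | none => simp [updB]
  | some cur =>
    simp only [updB]
    split
    · rfl
    · split
      · rfl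
      · exact (insert_get?_self best kv.1.1 cur hnd h).symm

-- the whole streaming loop in insert/updB normal form
lemma foldB_eq (its : List ((String × String) × Int)) :
    ∀ (best : PySem.Dict String (Int × PySem.Set String)), best.keys.Nodup →
    its.foldl (fun best kv =>
      match best.get? kv.1.1 with
      | none => best.insert kv.1.1 (kv.2, PySem.Set.add PySem.Set.empty kv.1.2)
      | some cur =>
        if cur.1 < kv.2 then best.insert kv.1.1 (kv.2, PySem.Set.add PySem.Set.empty kv.1.2)
        else if kv.2 == cur.1 then best.insert kv.1.1 (cur.1, PySem.Set.add cur.2 kv.1.2)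
        else best) best
      = its.foldl (fun b kv => b.insert kv.1.1 (updB (b.get? kv.1.1) kv)) best := by
  induction its with
  | nil => intro best _; rfl
  | cons kv ks ih =>
    intro best hnd
    simp only [List.foldl_cons]
    rw [stepB_eq best kv hnd]
    exact ih _ (PySem.Dict.nodup_keys_insert _ _ _ hnd)

-- lookup of the normalised loop: the per-label sub-stream
lemma foldB_get? (its : List ((String × String) × Int)) :
    ∀ (best : PySem.Dict String (Int × PySem.Set String)) (L : String),
    (its.foldl (fun b kv => b.insert kv.1.1 (updB (b.get? kv.1.1) kv)) best).get? L
      = (its.filter (fun kv => kv.1.1 == L)).foldl (fun c kv => some (updB c kv)) (best.get? L) := by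
  induction its with
  | nil => intro best L; rfl
  | cons kv ks ih =>
    intro best L
    simp only [List.foldl_cons, List.filter_cons]
    by_cases hk : kv.1.1 = L
    · rw [if_pos (by simp [hk]), List.foldl_cons, ih]
      rw [hk, PySem.Dict.get?_insert_self]
    · rw [if_neg (by simp [hk]), ih]
      rw [PySem.Dict.get?_insert_of_ne _ _ (fun h => hk h.symm)]

-- ---- B-side: small Set facts used by the stream characterisation ----
lemma update_nodup_disjoint : ∀ (l : List String) (s : PySem.Set String), l.Nodup → (∀ x ∈ l, x ∉ s) →
    PySem.Set.update s l = s ++ l := by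
  intro l
  induction l with
  | nil => intro s _ _; simp [PySem.Set.update]
  | cons x xs ih =>
    intro s hnd hdis
    have hx : x ∉ s := hdis x (List.mem_cons_self ..)
    show PySem.Set.update (PySem.Set.add s x) xs = s ++ x :: xs
    rw [PySem.Set.add_of_not_mem hx, ih (s ++ [x]) (List.nodup_cons.mp hnd).2
      (fun y hy => by
        simp only [List.mem_append, List.mem_singleton]
        rintro (h | rfl)
        · exact hdis y (List.mem_cons_of_mem _ hy) h
        · exact (List.nodup_cons.mp hnd).1 hy)]
    simp

lemma ofList_of_nodup (l : List String) (h : l.Nodup) : PySem.Set.ofList l = l := by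
  have := update_nodup_disjoint l [] h (by simp)
  simpa [PySem.Set.ofList] using this

-- ---- B-side: the per-label stream computes (max count, tokens achieving it) ----
lemma stream_char (c : String → Int) (L : String) :
    ∀ (TL : List String), TL.Nodup → TL ≠ [] →
    ∃ M : Int, (∀ t ∈ TL, c t ≤ M) ∧ (∃ t ∈ TL, c t = M) ∧
      TL.foldl (fun cur t => some (updB cur ((L, t), c t))) none
        = some (M, TL.filter (fun t => c t == M)) := by
  intro TL
  induction TL using List.reverseRecOn with
  | nil => intro _ h; exact absurd rfl h
  | append_singleton xs t ih =>
    intro hnd _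
    have hxs : xs.Nodup := (List.nodup_append.mp hnd).1
    have htx : t ∉ xs := by
      have h2 := List.disjoint_of_nodup_append hnd
      exact fun hm => h2 hm (by simp)
    rw [List.foldl_append]
    rcases hxe : xs with _ | ⟨y, ys⟩
    · refine ⟨c t, by simp, ⟨t, by simp⟩, ?_⟩
      simp [updB]
    · rw [← hxe]
      have hne : xs ≠ [] := by rw [hxe]; simp
      obtain ⟨M, hub, ⟨t0, ht0, ht0e⟩, heq⟩ := ih hxs hne
      rw [heq]
      simp only [List.foldl_cons, List.foldl_nil]
      by_cases hlt : M < c t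
      · refine ⟨c t, ?_, ⟨t, by simp, rfl⟩, ?_⟩
        · intro u hu
          rcases List.mem_append.mp hu with h | h
          · exact le_of_lt (lt_of_le_of_lt (hub u h) hlt)
          · simp only [List.mem_singleton] at h; rw [h]
        · have hxf : xs.filter (fun u => c u == c t) = [] :=
            List.filter_eq_nil_iff.mpr (fun u hu => by
              have := lt_of_le_of_lt (hub u hu) hlt; simp; omega)
          rw [List.filter_append, hxf]
          simp only [updB, if_pos hlt]
          rw [List.filter_cons]
          simp
      · by_cases heqc : c t = M
        · refine ⟨M, ?_, ⟨t0, List.mem_append_left _ ht0, ht0e⟩, ?_⟩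
          · intro u hu
            rcases List.mem_append.mp hu with h | h
            · exact hub u h
            · simp only [List.mem_singleton] at h; rw [h, heqc]
          · have h1 : ¬ (M < c t) := hlt
            have h2 : (c t == M) = true := by simp [heqc]
            simp only [updB]
            rw [if_neg h1, if_pos h2]
            have htW : t ∉ xs.filter (fun u => c u == M) := fun h => htx (List.mem_of_mem_filter h)
            rw [PySem.Set.add_of_not_mem htW, List.filter_append, List.filter_cons]
            simp [heqc]
        · refine ⟨M, ?_, ⟨t0, List.mem_append_left _ ht0, ht0e⟩, ?_⟩
          · intro u hu
            rcases List.mem_append.mp hu with h | h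
            · exact hub u h
            · simp only [List.mem_singleton] at h; rw [h]; omega
          · have h1 : ¬ (M < c t) := hlt
            have h3 : ¬ ((c t == M) = true) := by simp [heqc]
            simp only [updB]
            rw [if_neg h1, if_neg h3, List.filter_append, List.filter_cons]
            simp [heqc]

-- ---- B-side: flat pair list vs per-label token lists ----
-- tokens under label L read off the flat (label, token) list = tokens of the grouped fold
lemma toks_of_flatMap (L : String) : ∀ (zp : List (List String × String)),
    ((zp.flatMap (fun dl => dl.1.map (fun t => (dl.2, t)))).filter (fun k => k.1 == L)).map (·.2)
      = ((zp.filter (fun dl => decide (dl.1.isEmpty = false))).filter (fun dl => dl.2 == L)).flatMap (·.1) := by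
  intro zp
  induction zp with
  | nil => rfl
  | cons dl zs ih =>
    simp only [List.flatMap_cons, List.filter_append, List.map_append, List.filter_cons]
    rw [List.filter_map]
    by_cases hL : dl.2 = L
    · have hpred : ((fun k : String × String => k.1 == L) ∘ (fun t => (dl.2, t))) = fun _ => true := by
        funext t; simp [hL]
      rw [hpred, List.filter_true, List.map_map]
      have : ((fun k : String × String => k.2) ∘ (fun t => (dl.2, t))) = id := rfl
      rw [this, List.map_id]
      rcases hd : dl.1 with _ | ⟨x, xs⟩
      · simpa using ih
      · rw [if_pos (by simp), List.filter_cons, if_pos (by simp [hL]), List.flatMap_cons, hd]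
        rw [ih]
    · have hpred : ((fun k : String × String => k.1 == L) ∘ (fun t => (dl.2, t))) = fun _ => false := by
        funext t; simp [hL]
      rw [hpred, List.filter_false]
      simp only [List.map_nil, List.nil_append]
      split
      · rw [List.filter_cons, if_neg (by simp [hL])]
        exact ih
      · exact ih

-- value of the grouped (modify-extend) fold at a label
lemma getD_modify_extend : ∀ (l : List (List String × String)) (d : PySem.Dict String (List String)) (L : String),
    (l.foldl (fun d dl => d.modify dl.2 [] (· ++ dl.1)) d).getD L []
      = d.getD L [] ++ (l.filter (fun dl => dl.2 == L)).flatMap (·.1) := by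
  intro l
  induction l with
  | nil => intro d L; simp
  | cons dl zs ih =>
    intro d L
    simp only [List.foldl_cons, List.filter_cons]
    rw [ih]
    by_cases hL : dl.2 = L
    · rw [if_pos (by simp [hL]), List.flatMap_cons]
      rw [show (d.modify dl.2 [] (· ++ dl.1)).getD L [] = d.getD L [] ++ dl.1 by
        rw [PySem.Dict.getD_modify, if_pos hL.symm, hL]]
      simp
    · rw [if_neg (by simp [hL])]
      rw [show (d.modify dl.2 [] (· ++ dl.1)).getD L [] = d.getD L [] by
        rw [PySem.Dict.getD_modify, if_neg (fun h => hL h.symm)]]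

-- repeated insertion of one element into a set
lemma update_const_mem (a : String) : ∀ (l : List β) (s : PySem.Set String), a ∈ s →
    PySem.Set.update s (l.map (fun _ => a)) = s := by
  intro l
  induction l with
  | nil => intro s _; rfl
  | cons x xs ih =>
    intro s ha
    show PySem.Set.update (PySem.Set.add s a) (xs.map (fun _ => a)) = s
    rw [PySem.Set.add_of_mem ha, ih s ha]

lemma update_map_const (a : String) (l : List String) (s : PySem.Set String) :
    PySem.Set.update s (l.map (fun _ => a)) = if l.isEmpty then s else PySem.Set.add s a := by
  rcases l with _ | ⟨x, xs⟩
  · rfl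
  · show PySem.Set.update (PySem.Set.add s a) (xs.map (fun _ => a)) = _
    rw [update_const_mem a xs (PySem.Set.add s a) (by rw [PySem.Set.mem_add]; right; rfl)]
    rfl

lemma set_update_append (s : PySem.Set String) (l1 l2 : List String) :
    PySem.Set.update s (l1 ++ l2) = PySem.Set.update (PySem.Set.update s l1) l2 :=
  List.foldl_append

-- the labels occurring in the flat pair list = labels of the nonempty changesets, as a set
lemma labels_seen : ∀ (zp : List (List String × String)) (s : PySem.Set String),
    PySem.Set.update s (zp.flatMap (fun dl => dl.1.map (fun _ => dl.2)))
      = PySem.Set.update s ((zp.filter (fun dl => decide (dl.1.isEmpty = false))).map (·.2)) := by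
  intro zp
  induction zp with
  | nil => intro s; rfl
  | cons dl zs ih =>
    intro s
    simp only [List.flatMap_cons, List.filter_cons]
    rw [set_update_append, update_map_const]
    rcases hd : dl.1 with _ | ⟨x, xs⟩
    · simpa using ih s
    · rw [if_neg (by simp), if_pos (by simp), show ((dl :: List.filter (fun dl => decide (dl.1.isEmpty = false)) zs).map (·.2))
            = dl.2 :: ((List.filter (fun dl => decide (dl.1.isEmpty = false)) zs).map (·.2)) from List.map_cons ..]
      show _ = PySem.Set.update (PySem.Set.add s dl.2) _
      rw [ih]

-- counting a (label, token) pair in the flat list = counting the token among that label's tokens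
lemma count_pair (P : List (String × String)) (L t : String) :
    List.count (L, t) P = List.count t ((P.filter (fun k => k.1 == L)).map (·.2)) := by
  rw [List.count_eq_countP, List.count_eq_countP, List.countP_map, List.countP_filter]
  apply List.countP_congr
  intro k _
  obtain ⟨k1, k2⟩ := k
  simp [Prod.ext_iff, Function.comp, and_comm]

-- ---- B-side: ofList commutes with images / label filters ----
lemma ofList_map_fold : ∀ (P : List (String × String)) (sD : PySem.Set (String × String)) (s : PySem.Set String),
    s = PySem.Set.ofList (sD.map (·.1)) →
    PySem.Set.ofList ((P.foldl PySem.Set.add sD).map (·.1))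
      = P.foldl (fun s x => PySem.Set.add s x.1) s := by
  intro P
  induction P with
  | nil => intro sD s hs; simp [hs]
  | cons x xs ih =>
    intro sD s hs
    simp only [List.foldl_cons]
    by_cases hx : x ∈ sD
    · rw [PySem.Set.add_of_mem hx, PySem.Set.add_of_mem (by
        rw [hs, PySem.Set.mem_ofList]; exact List.mem_map_of_mem hx)]
      exact ih sD s hs
    · rw [PySem.Set.add_of_not_mem hx]
      apply ih
      rw [hs]
      simp [PySem.Set.ofList_eq_foldl, List.foldl_append]
lemma ofList_map_ofList (P : List (String × String)) :
    PySem.Set.ofList ((PySem.Set.ofList P).map (·.1)) = PySem.Set.ofList (P.map (·.1)) := by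
  rw [show (PySem.Set.ofList P : List (String × String)) = P.foldl PySem.Set.add [] from rfl,
      ofList_map_fold P [] [] rfl]
  rw [show (PySem.Set.ofList (P.map (·.1)) : List String) = (P.map (·.1)).foldl PySem.Set.add [] from rfl,
      List.foldl_map]

-- the distinct (L, ·) pairs of the flat list are the distinct tokens under L, paired with L
lemma ofList_filter_pairs (L : String) : ∀ (P : List (String × String))
    (sP : PySem.Set (String × String)) (sT : PySem.Set String),
    sP.filter (fun k => k.1 == L) = sT.map (fun t => (L, t)) →
    (P.foldl PySem.Set.add sP).filter (fun k => k.1 == L)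
      = (((P.filter (fun k => k.1 == L)).map (·.2)).foldl PySem.Set.add sT).map (fun t => (L, t)) := by
  intro P
  induction P with
  | nil => intro sP sT h; simpa using h
  | cons x xs ih =>
    intro sP sT h
    have hcorr : ∀ y : String × String, y.1 = L → (y ∈ sP ↔ y.2 ∈ sT) := by
      intro y hy
      constructor
      · intro hmem
        have : y ∈ sP.filter (fun k => k.1 == L) := List.mem_filter.mpr ⟨hmem, by simp [hy]⟩
        rw [h] at this
        obtain ⟨t, ht, hte⟩ := List.mem_map.mp this
        rw [← hte]
        exact ht
      · intro hmem
        have : y ∈ sT.map (fun t => (L, t)) := by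
          obtain ⟨y1, y2⟩ := y
          subst hy
          exact List.mem_map_of_mem hmem
        rw [← h] at this
        exact List.mem_of_mem_filter this
    simp only [List.foldl_cons, List.filter_cons]
    by_cases hL : x.1 = L
    · rw [if_pos (by simp [hL]), List.map_cons, List.foldl_cons]
      by_cases hx : x ∈ sP
      · rw [PySem.Set.add_of_mem hx, PySem.Set.add_of_mem ((hcorr x hL).mp hx)]
        exact ih sP sT h
      · rw [PySem.Set.add_of_not_mem hx,
            PySem.Set.add_of_not_mem (fun hm => hx ((hcorr x hL).mpr hm))]
        apply ih
        rw [List.filter_append, h, List.filter_cons, if_pos (by simp [hL]), List.filter_nil]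
        rw [List.map_append, List.map_cons, List.map_nil]
        congr 2
        obtain ⟨x1, x2⟩ := x
        simp only at hL
        rw [hL]
    · rw [if_neg (by simp [hL])]
      by_cases hx : x ∈ sP
      · rw [PySem.Set.add_of_mem hx]
        exact ih sP sT h
      · rw [PySem.Set.add_of_not_mem hx]
        apply ih
        rw [List.filter_append, h, List.filter_cons, if_neg (by simp [hL]), List.filter_nil,
            List.append_nil]

-- winners of A, written as a filter over the distinct tokens
lemma winA_filter (TK : List String) :
    winA TK = (PySem.Set.ofList TK).filter (fun t => ((TK.count t : Int)) == maxvOf TK) := by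
  rw [winA, PySem.Dict.items_counter, List.filter_map, List.map_map]
  rw [show ((fun p : String × Int => p.2 == maxvOf TK) ∘ (fun k => (k, (TK.count k : Int))))
        = fun t => ((TK.count t : Int)) == maxvOf TK from rfl]
  rw [show ((fun p : String × Int => p.1) ∘ (fun k => (k, (TK.count k : Int)))) = id from rfl, List.map_id]
  exact ofList_of_nodup _ ((PySem.Set.nodup_ofList TK).filter _)

-- the per-label slice of the streaming loop returns exactly (max count, A's winner set)
lemma label_value (P : List (String × String)) (L : String)
    (hne : (P.filter (fun k => k.1 == L)).map (·.2) ≠ []) :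
    ((((PySem.Set.ofList P).map (fun k => (k, (P.count k : Int)))).filter
        (fun kv => kv.1.1 == L)).foldl (fun c kv => some (updB c kv)) none)
      = some (maxvOf ((P.filter (fun k => k.1 == L)).map (·.2)),
              winA ((P.filter (fun k => k.1 == L)).map (·.2))) := by
  set TK := (P.filter (fun k => k.1 == L)).map (·.2) with hTK
  set TL := PySem.Set.ofList TK with hTL
  have hfil : ((PySem.Set.ofList P).map (fun k => (k, (P.count k : Int)))).filter (fun kv => kv.1.1 == L)
      = TL.map (fun t => ((L, t), (P.count (L, t) : Int))) := by
    rw [List.filter_map]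
    rw [show ((fun kv : (String × String) × Int => kv.1.1 == L) ∘ (fun k => (k, (P.count k : Int))))
          = fun k => k.1 == L from rfl]
    rw [show ((PySem.Set.ofList P : List (String × String)).filter (fun k => k.1 == L))
          = TL.map (fun t => (L, t)) by
      rw [hTL, hTK]
      exact ofList_filter_pairs L P [] [] rfl]
    rw [List.map_map]
    rfl
  rw [hfil, List.foldl_map]
  have hcongr : TL.foldl (fun cur t => some (updB cur ((L, t), (P.count (L, t) : Int)))) none
      = TL.foldl (fun cur t => some (updB cur ((L, t), (TK.count t : Int)))) none := by
    apply PySem.List.foldl_congr_mem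
    intro acc t _
    rw [count_pair P L t]
  rw [hcongr]
  have hTLne : TL ≠ [] := by
    rcases hTKe : TK with _ | ⟨t, ts⟩
    · exact absurd hTKe hne
    · intro hTLe
      have : t ∈ TL := by rw [hTL, PySem.Set.mem_ofList, hTKe]; simp
      rw [hTLe] at this
      simp at this
  obtain ⟨M, hub, ⟨t1, ht1, ht1e⟩, heq⟩ :=
    stream_char (fun t => (TK.count t : Int)) L TL (by rw [hTL]; exact PySem.Set.nodup_ofList TK) hTLne
  rw [heq]
  -- identify M with A's maxval
  have hvals : (PySem.Dict.counter TK).values = TL.map (fun t => (TK.count t : Int)) := by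
    show (PySem.Dict.counter TK).items.map (·.2) = _
    rw [PySem.Dict.items_counter, List.map_map]
    rfl
  have hM : M = maxvOf TK := by
    cases hmax : PySem.List.max? (PySem.Dict.counter TK).values (fun v => v) with
    | none =>
      rw [PySem.List.max?_eq_none_iff, hvals, List.map_eq_nil_iff] at hmax
      exact absurd hmax hTLne
    | some m =>
      have hmem := PySem.List.max?_mem hmax
      rw [hvals] at hmem
      obtain ⟨t0, ht0, ht0e⟩ := List.mem_map.mp hmem
      have h1 : m ≤ M := by rw [← ht0e]; exact hub t0 ht0
      have h2 : M ≤ m := by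
        have : ((TK.count t1 : Int)) ∈ (PySem.Dict.counter TK).values := by
          rw [hvals]; exact List.mem_map_of_mem ht1
        have := PySem.List.max?_isMax hmax _ this
        simpa [ht1e] using this
      rw [maxvOf, hmax]
      simp
      omega
  rw [hM, winA_filter]

-- ===== VERDICT (by name: the statement is the Claim_ definition above) =====
-- ---- final assembly ----
theorem transform_tagsets_spec : Claim_equal_transform_tagsets := by
  intro tagsets labels take_max _
  show transform_tagsets tagsets labels take_max = transform_tagsets_alt tagsets labels take_max
  simp only [transform_tagsets, transform_tagsets_alt]
  -- abbreviations
  set zp := tagsets.zip labels with hzp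
  set zf := zp.filter (fun dl => decide (dl.1.isEmpty = false)) with hzf
  set P := zp.flatMap (fun dl => dl.1.map (fun t => (dl.2, t))) with hP
  set grouped := zf.foldl (fun g dl => g.modify dl.2 [] (· ++ dl.1)) PySem.Dict.empty with hgrouped
  have hgnd : grouped.keys.Nodup :=
    PySem.Dict.nodup_keys_foldl_modify_key zf (·.2) [] (fun _ dl => (· ++ dl.1)) _ PySem.Dict.nodup_keys_empty
  have hgkeys : grouped.keys = PySem.Set.update [] (zf.map (·.2)) :=
    PySem.Dict.keys_foldl_modify_key zf (·.2) [] (fun _ dl => (· ++ dl.1)) PySem.Dict.empty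
  -- tokens per label
  have htok : ∀ L, grouped.getD L [] = (P.filter (fun k => k.1 == L)).map (·.2) := by
    intro L
    rw [hgrouped, getD_modify_extend, hP, toks_of_flatMap, hzf]
    rfl
  -- ===== A-side =====
  rw [show (PySem.Dict.empty : PySem.Dict String (PySem.Dict String Int))
        = mapVal PySem.Dict.counter PySem.Dict.empty from rfl]
  rw [zip_fold]
  rw [show (fun g (dl : List String × String) =>
        if dl.1.isEmpty = false then g.modify dl.2 [] (· ++ dl.1) else g)
      = (fun g (dl : List String × String) =>
        if dl.1.isEmpty = false then (fun g dl => PySem.Dict.modify g dl.2 [] (· ++ dl.1)) g dl else g) from rfl,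
      PySem.List.foldl_ite_eq_foldl_filter (fun dl : List String × String => dl.1.isEmpty = false)
        (fun g dl => PySem.Dict.modify g dl.2 [] (· ++ dl.1)) zp PySem.Dict.empty]
  rw [show (mapVal PySem.Dict.counter grouped).items
      = grouped.items.map (fun p => (p.1, PySem.Dict.counter p.2)) from rfl]
  rw [out_fold]
  rw [show (grouped.items.foldl (fun newres lt => newres.insert lt.1 (winA lt.2)) PySem.Dict.empty).items
      = grouped.items.map (fun p => (p.1, winA p.2)) by
    rw [PySem.Dict.items_foldl_insert_fresh grouped.items (·.1) (fun p => winA p.2) PySem.Dict.empty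
          (fun a _ => rfl) hgnd]
    rfl]
  rw [PySem.Dict.items_eq_map_keys grouped hgnd [], List.map_map]
  -- ===== B-side =====
  rw [PySem.List.foldl_append_eq_flatMap, List.nil_append]
  rw [foldB_eq _ _ PySem.Dict.nodup_keys_empty]
  set F := fun (b : PySem.Dict String (Int × PySem.Set String)) (kv : (String × String) × Int) =>
      b.insert kv.1.1 (updB (b.get? kv.1.1) kv) with hF
  set best := (PySem.Dict.counter P).items.foldl F PySem.Dict.empty with hbest
  have hbnd : best.keys.Nodup := by
    rw [hbest, hF]
    exact PySem.Dict.nodup_keys_foldl_insert_key _ (fun kv => kv.1.1)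
      (fun b kv => updB (b.get? kv.1.1) kv) _ PySem.Dict.nodup_keys_empty
  have hbkeys : best.keys = grouped.keys := by
    rw [hbest, hF,
        PySem.Dict.keys_foldl_insert_key _ (fun kv => kv.1.1) (fun b kv => updB (b.get? kv.1.1) kv)
          PySem.Dict.empty]
    rw [PySem.Dict.items_counter, List.map_map]
    rw [show ((fun kv : (String × String) × Int => kv.1.1) ∘ (fun k => (k, (P.count k : Int))))
        = (fun k : String × String => k.1) from rfl]
    rw [show (PySem.Dict.empty : PySem.Dict String (Int × PySem.Set String)).keys = ([] : PySem.Set String) from rfl]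
    rw [show PySem.Set.update ([] : PySem.Set String) ((PySem.Set.ofList P).map (·.1))
        = PySem.Set.ofList ((PySem.Set.ofList P).map (·.1)) from rfl]
    rw [ofList_map_ofList]
    rw [show PySem.Set.ofList (P.map (·.1)) = PySem.Set.update [] (P.map (·.1)) from rfl]
    rw [hP, List.map_flatMap]
    rw [show (fun dl : List String × String => (dl.1.map (fun t => (dl.2, t))).map (·.1))
        = (fun dl : List String × String => dl.1.map (fun _ => dl.2)) by
      funext dl; rw [List.map_map]; rfl]
    rw [labels_seen zp [], hgkeys, hzf]
  have hval : ∀ L ∈ grouped.keys, best.get? L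
      = some (maxvOf ((P.filter (fun k => k.1 == L)).map (·.2)),
              winA ((P.filter (fun k => k.1 == L)).map (·.2))) := by
    intro L hL
    have htokne : (P.filter (fun k => k.1 == L)).map (·.2) ≠ [] := by
      rw [hgkeys] at hL
      rw [show PySem.Set.update ([] : PySem.Set String) (zf.map (·.2))
          = PySem.Set.ofList (zf.map (·.2)) from rfl, PySem.Set.mem_ofList] at hL
      obtain ⟨dl, hdl, hdle⟩ := List.mem_map.mp hL
      have hdl' := hdl
      rw [hzf] at hdl'
      have hdne : dl.1 ≠ [] := by
        have := List.of_mem_filter hdl'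
        simpa using this
      obtain ⟨x, hx⟩ := List.exists_mem_of_ne_nil dl.1 hdne
      apply List.ne_nil_of_mem (a := x)
      rw [← htok L, hgrouped, getD_modify_extend]
      simp only [PySem.Dict.getD_empty, List.nil_append]
      rw [List.mem_flatMap]
      exact ⟨dl, List.mem_filter.mpr ⟨hdl, by simp [hdle]⟩, hx⟩
    rw [hbest, hF, foldB_get?, PySem.Dict.items_counter]
    rw [show (PySem.Dict.empty : PySem.Dict String (Int × PySem.Set String)).get? L = none from rfl]
    exact label_value P L htokne
  rw [PySem.Dict.items_eq_map_keys best hbnd (0, PySem.Set.empty), List.map_map, hbkeys]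
  apply List.map_congr_left
  intro L hL
  show (L, winA (grouped.getD L [])) = (L, (best.getD L (0, PySem.Set.empty)).2)
  rw [htok L, PySem.Dict.getD_eq_get?_getD, hval L hL]
  rfl
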